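-- pv_equiv track=rewrite | github.com/Q-Vortex/CryptoParser | main.py | infomake
-- ===== SOURCE A (Python) =====
-- def infomake(info):
--     for i in range(len(info)):
--         info[i] = info[i].replace('\u2212', '-').replace('\u202f', '')
--
--     signal_words = {"buy", "sell"}
--     i = 1
--
--     while i < len(info):
--         if info[i] in signal_words:
--             info[i - 1] = f"{info[i - 1]} {info[i]}"
--             del info[i]
--         else:
--             i += 1
--
--     del info[1]
--
--     return info
-- ===== SOURCE B (Python) =====
-- def infomake(info):
--     signal_words = {"buy", "sell"}
--     merged = []
--     for s in info:
--         t = s.replace('\u2212', '-').replace('\u202f', '')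
--         if t in signal_words and merged:
--             merged[-1] = f"{merged[-1]} {t}"
--         else:
--             merged.append(t)
--     return merged[:1] + merged[2:]
-- ===== Notes on version B (the rewrite author's own statement) =====
-- stated objective: alternative
-- what changed: Replaced the in-place while loop (index juggling with repeated del from the list being scanned, then 'del info[1]') with a single forward pass that builds a new list, merging each signal word onto the last accumulated element, followed by the raise-free slice concatenation merged[:1]+merged[2:]; it trades in-place mutation for an extra output list.
import Mathlib
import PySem

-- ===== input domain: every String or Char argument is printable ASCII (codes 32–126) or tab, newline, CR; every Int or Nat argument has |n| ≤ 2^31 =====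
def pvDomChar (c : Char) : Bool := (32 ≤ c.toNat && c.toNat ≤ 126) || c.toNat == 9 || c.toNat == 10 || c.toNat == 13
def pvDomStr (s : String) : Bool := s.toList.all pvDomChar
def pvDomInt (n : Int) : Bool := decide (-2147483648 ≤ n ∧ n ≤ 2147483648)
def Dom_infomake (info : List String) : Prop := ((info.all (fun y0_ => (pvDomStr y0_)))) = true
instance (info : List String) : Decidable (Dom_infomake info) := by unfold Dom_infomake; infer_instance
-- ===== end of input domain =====

-- B is a single forward pass building a new list (A repeatedly deletes from the list in place);
-- equivalence is about the RETURN value only: A mutates its argument in place, B does not.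

-- shared by both ports: s.replace('\u2212','-').replace('\u202f','')
def cleanS (s : String) : String :=
  PySem.Str.replace (PySem.Str.replace s "\u2212" "-") "\u202f" ""

-- signal_words = {"buy", "sell"}
def signalWords : PySem.Set String := PySem.Set.ofList ["buy", "sell"]

-- ===== PORT A =====
-- the while loop: i is the current index; del shortens the list
def infomakeLoop (l : List String) (i : Nat) : List String :=
  if h : i < l.length then
    if l.getD i "" ∈ signalWords then
      infomakeLoop ((l.set (i - 1) (l.getD (i - 1) "" ++ " " ++ l.getD i "")).eraseIdx i) i
    else
      infomakeLoop l (i + 1)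
  else l
termination_by l.length - i
decreasing_by
  · simp only [List.length_eraseIdx, List.length_set, if_pos h]
    omega
  · omega

-- 'del info[1]' is ported as eraseIdx 1; Pre_infomake guarantees 1 < length there (Python raises IndexError otherwise)
def infomake (info : List String) : List String :=
  (infomakeLoop (info.map cleanS) 1).eraseIdx 1

-- ===== PORT B =====
def stepB (acc : List String) (t : String) : List String :=
  if t ∈ signalWords ∧ acc ≠ [] then
    acc.dropLast ++ [acc.getLastD "" ++ " " ++ t]
  else
    acc ++ [t]

def infomake_alt (info : List String) : List String :=
  let merged := info.foldl (fun acc s => stepB acc (cleanS s)) []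
  PySem.List.slice merged none (some 1) ++ PySem.List.slice merged (some 2) none

-- ===== PRECONDITION & SPEC =====
-- Pre_ excludes exactly the inputs on which A's final 'del info[1]' raises IndexError:
-- those where every element after the first is a signal word (so the merged list has length < 2).
def Pre_infomake (info : List String) : Prop :=
  ∃ s ∈ info.tail, s ≠ "buy" ∧ s ≠ "sell"
instance (info : List String) : Decidable (Pre_infomake info) := by unfold Pre_infomake; infer_instance

def pvWitness_infomake : List String := ["BTC", "price", "buy"]

def Spec_infomake (info : List String) (out : List String) : Prop := out = infomake_alt info
instance (info : List String) (out : List String) : Decidable (Spec_infomake info out) := by unfold Spec_infomake; infer_instance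

-- ===== CLAIM (what is proved, stated in full; the proofs are below) =====
def Claim_equal_infomake : Prop := ∀ (info : List String), Dom_infomake info → Pre_infomake info → Spec_infomake info (infomake info)

-- ===== LEMMAS AND PROOFS =====

-- setting the last slot of acc inside acc ++ rest, then deleting the element after it
lemma set_last_append {acc rest : List String} (h : acc ≠ []) (x : String) :
    (acc ++ rest).set (acc.length - 1) x = (acc.dropLast ++ [x]) ++ rest := by
  have hl : 0 < acc.length := List.length_pos_iff.mpr h
  rw [List.set_append_left _ _ (by omega)]
  congr 1
  conv_lhs => rw [← List.dropLast_append_getLast h]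
  rw [List.set_append_right _ _ (by simp)]
  simp

lemma getD_last {acc rest : List String} (h : acc ≠ []) :
    (acc ++ rest).getD (acc.length - 1) "" = acc.getLastD "" := by
  have hl : 0 < acc.length := List.length_pos_iff.mpr h
  rw [List.getD_eq_getElem?_getD, List.getElem?_append_left (by omega),
      List.getLastD_eq_getLast?, List.getLast?_eq_getElem?]

lemma eraseIdx_append_length (acc : List String) (t : String) (rest : List String) :
    ((acc ++ t :: rest).eraseIdx acc.length) = acc ++ rest := by
  induction acc with
  | nil => simp
  | cons a as ih => simp [ih]

lemma getD_append_length (acc : List String) (t : String) (rest : List String) :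
    (acc ++ t :: rest).getD acc.length "" = t := by
  rw [List.getD_eq_getElem?_getD, List.getElem?_append_right (le_refl _)]
  simp

-- the loop, started at the boundary between processed acc and unprocessed rest, is B's fold
lemma loop_eq_foldl (rest : List String) :
    ∀ acc : List String, acc ≠ [] →
      infomakeLoop (acc ++ rest) acc.length = rest.foldl stepB acc := by
  induction rest with
  | nil =>
    intro acc _
    rw [infomakeLoop]
    simp
  | cons t rs ih =>
    intro acc hacc
    rw [infomakeLoop]
    have hlen : acc.length < (acc ++ t :: rs).length := by simp
    rw [dif_pos hlen, getD_append_length]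
    by_cases hs : t ∈ signalWords
    · rw [if_pos hs]
      rw [getD_last hacc, set_last_append hacc]
      have hl : 0 < acc.length := List.length_pos_iff.mpr hacc
      have hlen2 : acc.length = (acc.dropLast ++ [acc.getLastD "" ++ " " ++ t]).length := by
        simp [List.length_dropLast]
        omega
      rw [hlen2, eraseIdx_append_length, ih _ (by simp)]
      simp [List.foldl, stepB, if_pos (And.intro hs hacc)]
    · rw [if_neg hs]
      have : acc.length + 1 = (acc ++ [t]).length := by simp
      rw [show acc ++ t :: rs = (acc ++ [t]) ++ rs by simp, this, ih _ (by simp)]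
      simp [List.foldl, stepB, hs]

-- for every list, deleting index 1 equals take 1 ++ drop 2
lemma eraseIdx_one (m : List String) : m.eraseIdx 1 = m.take 1 ++ m.drop 2 := by
  match m with
  | [] => rfl
  | [a] => rfl
  | a :: b :: r => simp [List.eraseIdx]

lemma ports_agree (info : List String) : infomake info = infomake_alt info := by
  unfold infomake infomake_alt
  have hslice : ∀ m : List String,
      PySem.List.slice m none (some 1) ++ PySem.List.slice m (some 2) none = m.take 1 ++ m.drop 2 := by
    intro m
    rw [PySem.List.slice_to m (by norm_num), PySem.List.slice_from m (by norm_num)]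
    rfl
  rw [hslice, ← eraseIdx_one]
  congr 1
  rw [← List.foldl_map]
  cases h : info.map cleanS with
  | nil => rw [infomakeLoop]; simp
  | cons c cs =>
    have hloop := loop_eq_foldl cs [c] (by simp)
    simp only [List.singleton_append, List.length_singleton] at hloop
    rw [hloop]
    simp [List.foldl, stepB]

-- ===== VERDICT (by name: the statement is the Claim_ definition above) =====
theorem infomake_spec : Claim_equal_infomake := by
  intro info _ _
  unfold Spec_infomake
  exact ports_agree info
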